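-- pv_equiv track=rewrite | github.com/Ratty123/crimson-forge-toolkit | crimson_texture_forge/core/pipeline.py | parse_filter_patterns
-- ===== SOURCE A (Python) =====
-- from typing import Callable, Dict, List, Optional, Sequence, Tuple
--
-- def parse_filter_patterns(raw_text: str) -> Tuple[str, ...]:
--     tokens: List[str] = []
--     for line in raw_text.replace("\r", "\n").split("\n"):
--         for piece in line.split(";"):
--             token = piece.strip()
--             if token:
--                 tokens.append(token)
--     return tuple(tokens)
-- ===== SOURCE B (Python) =====
-- def parse_filter_patterns(raw_text):
--     # Single character pass: flush the current fragment at every delimiter character.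
--     tokens = []
--     cur = []
--     for ch in raw_text + "\n":
--         if ch in ";\r\n":
--             token = "".join(cur).strip()
--             if token:
--                 tokens.append(token)
--             cur = []
--         else:
--             cur.append(ch)
--     return tuple(tokens)
-- ===== Notes on version B (the rewrite author's own statement) =====
-- stated objective: alternative
-- what changed: Replaced the replace-then-split-then-nested-split traversal with a single character-level pass that accumulates the current fragment and flushes a stripped token at every delimiter character (semicolon, carriage return, newline).
import Mathlib
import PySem

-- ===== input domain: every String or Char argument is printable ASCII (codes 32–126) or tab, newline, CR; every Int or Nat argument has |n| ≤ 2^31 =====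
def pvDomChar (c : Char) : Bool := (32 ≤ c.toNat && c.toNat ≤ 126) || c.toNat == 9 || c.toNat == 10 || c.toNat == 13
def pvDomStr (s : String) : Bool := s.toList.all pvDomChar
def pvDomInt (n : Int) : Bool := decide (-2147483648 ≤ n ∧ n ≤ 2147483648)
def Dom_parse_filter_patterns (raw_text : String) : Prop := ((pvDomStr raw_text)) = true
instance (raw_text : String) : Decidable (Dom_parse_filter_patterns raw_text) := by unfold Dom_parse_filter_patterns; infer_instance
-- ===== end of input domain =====

-- B replaces A's replace-then-split-then-split nested traversal by a single character pass
-- that flushes a stripped token at every delimiter character (alternative decomposition, same cost).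

-- ===== PORT A =====
def parse_filter_patterns (raw_text : String) : List String :=
  (PySem.Chars.splitOn (PySem.Chars.replace raw_text.toList ['\r'] ['\n']) ['\n']).foldl
    (fun tokens line =>
      (PySem.Chars.splitOn line [';']).foldl
        (fun tokens piece =>
          let token := PySem.Chars.strip piece
          if token ≠ [] then tokens ++ [String.mk token] else tokens)
        tokens)
    []

-- ===== PORT B =====
-- one step of B's single pass: flush the current fragment at a delimiter, else extend it
def bStep (st : List String × List Char) (ch : Char) : List String × List Char :=
  if ch = ';' ∨ ch = '\r' ∨ ch = '\n' then
    let token := PySem.Chars.strip st.2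
    (if token ≠ [] then st.1 ++ [String.mk token] else st.1, [])
  else
    (st.1, st.2 ++ [ch])

def parse_filter_patterns_alt (raw_text : String) : List String :=
  ((raw_text.toList ++ ['\n']).foldl bStep ([], [])).1

-- ===== PRECONDITION & SPEC =====
def Spec_parse_filter_patterns (raw_text : String) (out : List String) : Prop := out = parse_filter_patterns_alt raw_text
instance (raw_text : String) (out : List String) : Decidable (Spec_parse_filter_patterns raw_text out) := by unfold Spec_parse_filter_patterns; infer_instance

-- ===== CLAIM (what is proved, stated in full; the proofs are below) =====
def Claim_equal_parse_filter_patterns : Prop := ∀ (raw_text : String), Dom_parse_filter_patterns raw_text → Spec_parse_filter_patterns raw_text (parse_filter_patterns raw_text)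

-- ===== LEMMAS AND PROOFS =====

-- split a char list at every char satisfying p (pieces in order, no separators kept)
def splitP (p : Char → Bool) : List Char → List (List Char)
  | [] => [[]]
  | c :: cs => if p c then [] :: splitP p cs else (splitP p cs).modifyHead (c :: ·)

-- the token(s) one raw piece contributes
def emitTok (cur : List Char) : List String :=
  let token := PySem.Chars.strip cur
  if token ≠ [] then [String.mk token] else []

def dl (c : Char) : Bool := decide (c = ';' ∨ c = '\r' ∨ c = '\n')

lemma splitP_ne_nil (p : Char → Bool) : ∀ l, splitP p l ≠ []
  | [] => by simp [splitP]
  | c :: cs => by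
    have := splitP_ne_nil p cs
    simp only [splitP]
    split_ifs
    · simp
    · cases h : splitP p cs
      · exact absurd h this
      · simp

lemma replace_go_single (r n : Char) : ∀ (l : List Char) (fuel : Nat) (acc : List Char), l.length ≤ fuel →
    PySem.Chars.replace.go [r] [n] fuel l acc = acc.reverse ++ l.map (fun c => if c = r then n else c)
  | [], fuel, acc, _ => by cases fuel <;> simp [PySem.Chars.replace.go]
  | c :: t, fuel + 1, acc, h => by
    simp only [PySem.Chars.replace.go, List.isPrefixOf]
    by_cases hc : c = r
    · subst hc
      simp only [beq_self_eq_true, Bool.true_and, if_true]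
      rw [replace_go_single c n _ fuel _ (by simpa using Nat.le_of_succ_le_succ h)]
      simp
    · simp only [List.length_cons] at h
      rw [if_neg (by simp [Ne.symm hc]), replace_go_single r n t fuel _ (by omega)]
      simp [hc]

lemma replace_single (r n : Char) (l : List Char) :
    PySem.Chars.replace l [r] [n] = l.map (fun c => if c = r then n else c) := by
  simpa using replace_go_single r n l l.length [] le_rfl

lemma splitOn_go_single (d : Char) : ∀ (l : List Char) (fuel : Nat) (cur : List Char) (acc : List (List Char)),
    l.length ≤ fuel →
    PySem.Chars.splitOn.go [d] fuel l cur acc =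
      acc.reverse ++ (splitP (· == d) l).modifyHead (cur.reverse ++ ·)
  | [], fuel, cur, acc, _ => by cases fuel <;> simp [PySem.Chars.splitOn.go, splitP, List.modifyHead]
  | c :: t, fuel + 1, cur, acc, h => by
    simp only [PySem.Chars.splitOn.go, List.isPrefixOf]
    obtain ⟨h0, rest, hsp⟩ := List.exists_cons_of_ne_nil (splitP_ne_nil (· == d) t)
    by_cases hc : c = d
    · subst hc
      simp only [beq_self_eq_true, Bool.true_and, if_true, List.length_cons, List.length_nil,
        List.drop_succ_cons, List.drop_zero]
      rw [splitOn_go_single c t fuel [] _ (by simpa using Nat.le_of_succ_le_succ h)]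
      simp [splitP, hsp, List.modifyHead]
    · simp only [List.length_cons] at h
      rw [if_neg (by simp [Ne.symm hc]), splitOn_go_single d t fuel (c :: cur) acc (by omega)]
      simp [splitP, hc, hsp]

lemma splitOn_single (d : Char) (l : List Char) :
    PySem.Chars.splitOn l [d] = splitP (· == d) l := by
  have := splitOn_go_single d l (l.length + 1) [] [] (by omega)
  rw [PySem.Chars.splitOn, this]
  obtain ⟨h0, rest, hsp⟩ := List.exists_cons_of_ne_nil (splitP_ne_nil (· == d) l)
  simp [hsp]

-- splitting the '\r'→'\n'-mapped text on '\n' and each line on ';' = one split on all three delimiters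
lemma splitP_comp : ∀ cs : List Char,
    (splitP (· == '\n') (cs.map (fun c => if c = '\r' then '\n' else c))).flatMap (splitP (· == ';')) =
      splitP dl cs
  | [] => by simp [splitP, dl]
  | c :: cs => by
    have IH := splitP_comp cs
    obtain ⟨h0, rest, hsp⟩ :=
      List.exists_cons_of_ne_nil (splitP_ne_nil (· == '\n') (cs.map (fun c => if c = '\r' then '\n' else c)))
    by_cases hr : c = '\r' ∨ c = '\n'
    · have hmap : (if c = '\r' then '\n' else c) = '\n' := by rcases hr with h | h <;> simp [h]
      simp only [List.map_cons, hmap, splitP, beq_self_eq_true, if_true, List.flatMap_cons]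
      have hdl : dl c = true := by rcases hr with h | h <;> simp [dl, h]
      simp [splitP, hdl, IH]
    · push_neg at hr
      have hmap : (if c = '\r' then '\n' else c) = c := by simp [hr.1]
      simp only [List.map_cons, hmap, splitP]
      rw [if_neg (by simp [hr.2]), hsp]
      by_cases hs : c = ';'
      · subst hs
        simp only [List.modifyHead, List.flatMap_cons, splitP, beq_self_eq_true, if_true]
        have hdl : dl ';' = true := by simp [dl]
        rw [hsp] at IH
        simp only [List.flatMap_cons] at IH
        simp [splitP, hdl, ← IH]
      · obtain ⟨k, ks, hk⟩ := List.exists_cons_of_ne_nil (splitP_ne_nil (· == ';') h0)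
        have hdl : dl c = false := by simp [dl, hs, hr.1, hr.2]
        simp only [List.modifyHead, List.flatMap_cons, splitP]
        rw [if_neg (by simp [hs]), hk, hdl]
        rw [hsp] at IH
        simp only [List.flatMap_cons, hk] at IH
        simp only [Bool.false_eq_true, if_false, ← IH]
        simp [List.modifyHead]

-- A's inner loop over one line's ';'-pieces
lemma inner_fold : ∀ (pieces : List (List Char)) (init : List String),
    pieces.foldl
        (fun tokens piece =>
          let token := PySem.Chars.strip piece
          if token ≠ [] then tokens ++ [String.mk token] else tokens)
        init = init ++ pieces.flatMap emitTok
  | [], init => by simp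
  | p :: ps, init => by
    simp only [List.foldl_cons, List.flatMap_cons, inner_fold ps]
    simp only [emitTok]
    split_ifs <;> simp

-- A's double loop, flattened
lemma a_fold (lines : List (List Char)) (init : List String) :
    lines.foldl
        (fun tokens line =>
          (PySem.Chars.splitOn line [';']).foldl
            (fun tokens piece =>
              let token := PySem.Chars.strip piece
              if token ≠ [] then tokens ++ [String.mk token] else tokens)
            tokens)
        init = init ++ (lines.flatMap (fun line => (splitP (· == ';') line).flatMap emitTok)) := by
  induction lines generalizing init with
  | nil => simp
  | cons l ls ih =>
    simp only [List.foldl_cons, List.flatMap_cons, splitOn_single, inner_fold, ih]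
    simp [List.flatMap]

lemma parse_filter_patterns_eq_canon (raw_text : String) :
    parse_filter_patterns raw_text = (splitP dl raw_text.toList).flatMap emitTok := by
  rw [parse_filter_patterns, replace_single, splitOn_single, a_fold]
  rw [← splitP_comp raw_text.toList]
  simp [List.flatMap_assoc]

lemma splitP_append_not (p : Char → Bool) : ∀ (C xs : List Char), (∀ c ∈ C, p c = false) →
    splitP p (C ++ xs) = (splitP p xs).modifyHead (C ++ ·)
  | [], xs, _ => by
    obtain ⟨h0, rest, hsp⟩ := List.exists_cons_of_ne_nil (splitP_ne_nil p xs)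
    simp [hsp]
  | c :: C, xs, h => by
    have hc : p c = false := h c (by simp)
    simp only [List.cons_append, splitP, hc, Bool.false_eq_true, if_false]
    rw [splitP_append_not p C xs (fun d hd => h d (by simp [hd]))]
    obtain ⟨h0, rest, hsp⟩ := List.exists_cons_of_ne_nil (splitP_ne_nil p xs)
    simp [hsp]

-- invariant of B's single pass
lemma b_fold : ∀ (cs : List Char) (T : List String) (C : List Char), (∀ c ∈ C, dl c = false) →
    ((cs ++ ['\n']).foldl bStep (T, C)).1 = T ++ (splitP dl (C ++ cs)).flatMap emitTok
  | [], T, C, hC => by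
    have hsp := splitP_append_not dl C [] hC
    rw [List.append_nil] at hsp
    rw [List.append_nil, hsp]
    simp only [List.nil_append, List.foldl_cons, List.foldl_nil, bStep]
    simp only [or_true, if_true, splitP, List.modifyHead, List.append_nil, List.flatMap_cons,
      List.flatMap_nil, emitTok]
    split_ifs <;> simp
  | c :: cs, T, C, hC => by
    by_cases hc : c = ';' ∨ c = '\r' ∨ c = '\n'
    · have hdl : dl c = true := by simp [dl, hc]
      simp only [List.cons_append, List.foldl_cons, bStep, if_pos hc]
      rw [b_fold cs _ [] (by simp)]
      rw [splitP_append_not dl C (c :: cs) hC]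
      simp only [splitP, hdl, if_true, List.modifyHead, List.append_nil, List.flatMap_cons,
        List.nil_append, emitTok]
      split_ifs <;> simp
    · have hdl : dl c = false := by simp [dl, hc]
      simp only [List.cons_append, List.foldl_cons, bStep, if_neg hc]
      have hC' : ∀ d ∈ C ++ [c], dl d = false := by
        intro d hd
        rcases List.mem_append.mp hd with h | h
        · exact hC d h
        · simp at h; subst h; exact hdl
      rw [b_fold cs T (C ++ [c]) hC']
      simp

-- ===== VERDICT (by name: the statement is the Claim_ definition above) =====
theorem parse_filter_patterns_spec : Claim_equal_parse_filter_patterns := by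
  intro raw_text _
  unfold Spec_parse_filter_patterns
  rw [parse_filter_patterns_eq_canon, parse_filter_patterns_alt]
  rw [b_fold raw_text.toList [] [] (by simp)]
  simp
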